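-- pv_equiv track=rewrite | github.com/davips/garoupa | garoupa/linalg.py | unfac
-- ===== SOURCE A (Python) =====
-- def unfac(n):
--     tofac = 1
--     res, rem = n, 1
--     while res > 0:
--         tofac += 1
--         res, rem = divmod(res, tofac)
--     if tofac < 6:  # 6x6 to represent at least 1 byte as key
--         tofac = 6
--     return tofac
-- ===== SOURCE B (Python) =====
-- def unfac(n):
--     k = 1
--     fact = 1
--     while fact <= n:
--         k += 1
--         fact *= k
--     return max(k, 6)
-- ===== Notes on version B (the rewrite author's own statement) =====
-- stated objective: simpler
-- what changed: B maintains a growing factorial product compared against n (smallest k with k! > n) instead of A's chained divmod that shrinks a quotient of n until it reaches zero.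
import Mathlib
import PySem

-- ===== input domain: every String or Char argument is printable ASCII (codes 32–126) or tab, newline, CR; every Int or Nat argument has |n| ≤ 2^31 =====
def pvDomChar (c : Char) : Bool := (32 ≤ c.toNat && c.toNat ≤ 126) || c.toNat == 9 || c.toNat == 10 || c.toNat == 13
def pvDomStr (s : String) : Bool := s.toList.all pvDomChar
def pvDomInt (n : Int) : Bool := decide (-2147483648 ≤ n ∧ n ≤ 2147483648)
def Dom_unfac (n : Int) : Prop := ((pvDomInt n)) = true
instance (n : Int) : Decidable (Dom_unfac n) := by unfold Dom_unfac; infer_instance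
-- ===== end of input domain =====

-- B replaces A's chained divmod (shrinking a quotient of n to zero) with a growing factorial
-- product compared against n; same return value, objective: simpler.

-- ===== PORT A =====
-- A's while-loop; tofac is carried as j+1 (the Nat offset keeps the divisor ≥ 2,
-- which gives the strictly decreasing measure); rem is carried, unused, as in A.
def unfacA_loop (j : Nat) (res rem : Int) : Int :=
  if h : res > 0 then
    unfacA_loop (j+1) (PySem.Int.floordiv res ((j:Int)+2)) (PySem.Int.mod res ((j:Int)+2))
  else ((j:Int)+1)
termination_by res.toNat
decreasing_by
  have h1 : PySem.Int.floordiv res ((j:Int)+2) < res := by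
    rw [PySem.Int.floordiv_lt_iff_lt_mul (by positivity)]
    nlinarith
  omega

def unfac (n : Int) : Int :=
  let tofac := unfacA_loop 0 n 1
  if tofac < 6 then 6 else tofac

-- ===== PORT B =====
-- B's while-loop; k is carried as j+1 and fact as f+1 (Nat offsets: fact ≥ 1 and the
-- multiplier k ≥ 2 hold by construction, giving the decreasing measure).
def unfacB_loop (n : Int) (j f : Nat) : Int :=
  if ((f:Int)+1) ≤ n then
    unfacB_loop n (j+1) ((f+1)*(j+2)-1)
  else ((j:Int)+1)
termination_by n.toNat - f
decreasing_by
  have h2 : 2*(f+1) ≤ (f+1)*(j+2) := by nlinarith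
  omega

def unfac_alt (n : Int) : Int := max (unfacB_loop n 0 0) 6

-- ===== PRECONDITION & SPEC =====
def Spec_unfac (n : Int) (out : Int) : Prop := out = unfac_alt n
instance (n : Int) (out : Int) : Decidable (Spec_unfac n out) := by unfold Spec_unfac; infer_instance

-- ===== CLAIM (what is proved, stated in full; the proofs are below) =====
def Claim_equal_unfac : Prop := ∀ (n : Int), Dom_unfac n → Spec_unfac n (unfac n)

-- ===== LEMMAS AND PROOFS =====

-- Invariant: when A's residue is n // (f+1) (the chained quotient so far), the two loops
-- step in lockstep and return the same value; rem is arbitrary (A never reads it).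
theorem loops_agree (n : Int) : ∀ (j f : Nat) (rem : Int),
    unfacA_loop j (PySem.Int.floordiv n ((f:Int)+1)) rem = unfacB_loop n j f := by
  intro j f
  induction j, f using unfacB_loop.induct n with
  | case1 j f hle ih =>
    intro rem
    have hcond : PySem.Int.floordiv n ((f:Int)+1) > 0 := by
      have := (PySem.Int.le_floordiv_iff_mul_le (a := n) (b := ((f:Int)+1)) (q := 1)
        (by positivity)).mpr (by linarith)
      omega
    rw [unfacA_loop, dif_pos hcond, unfacB_loop, if_pos hle]
    have hchain : PySem.Int.floordiv (PySem.Int.floordiv n ((f:Int)+1)) ((j:Int)+2)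
        = PySem.Int.floordiv n ((((f+1)*(j+2)-1 : Nat) : Int)+1) := by
      rw [PySem.Int.floordiv_eq_ediv_of_pos (by positivity),
          PySem.Int.floordiv_eq_ediv_of_pos (by positivity),
          PySem.Int.floordiv_eq_ediv_of_pos (by positivity),
          Int.ediv_ediv_of_nonneg (by positivity)]
      congr 1
    rw [hchain]
    exact ih _
  | case2 j f hle =>
    intro rem
    have hcond : ¬ PySem.Int.floordiv n ((f:Int)+1) > 0 := by
      intro h
      exact hle ((PySem.Int.le_floordiv_iff_mul_le (a := n) (b := ((f:Int)+1)) (q := 1)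
        (by positivity)).mp (by omega) |>.trans_eq' (by ring_nf))
    rw [unfacA_loop, dif_neg hcond, unfacB_loop, if_neg hle]

-- ===== VERDICT (by name: the statement is the Claim_ definition above) =====
theorem unfac_spec : Claim_equal_unfac := by
  intro n _
  unfold Spec_unfac unfac unfac_alt
  have h := loops_agree n 0 0 1
  simp only [Nat.cast_zero, zero_add] at h
  rw [show PySem.Int.floordiv n 1 = n by simp [PySem.Int.floordiv]] at h
  rw [h]
  show (if unfacB_loop n 0 0 < 6 then (6:Int) else unfacB_loop n 0 0) = max (unfacB_loop n 0 0) 6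
  omega
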